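-- pv_equiv track=rewrite | github.com/nizam-certifyos/sales-deck | src/universal_roster_v2/core/profile.py | _detect_roster_type_from_columns
-- ===== SOURCE A (Python) =====
-- from typing import Any, Dict, List, Optional, Tuple
--
-- def _detect_roster_type_from_columns(columns: List[str]) -> str:
--     lowered = [c.lower() for c in columns]
--
--     practitioner_signals = [
--         "first name",
--         "last name",
--         "dob",
--         "date of birth",
--         "taxonomy",
--         "specialty",
--         "dea",
--         "caqh",
--         "provider",
--     ]
--     facility_signals = [
--         "facility",
--         "organization",
--         "facility type",
--         "line of business",
--         "group npi",
--         "facility npi",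
--     ]
--
--     p_score = sum(1 for signal in practitioner_signals if any(signal in col for col in lowered))
--     f_score = sum(1 for signal in facility_signals if any(signal in col for col in lowered))
--     return "practitioner" if p_score >= f_score else "facility"
-- ===== SOURCE B (Python) =====
-- _PRACTITIONER_SIGNALS = [
--     "first name",
--     "last name",
--     "dob",
--     "date of birth",
--     "taxonomy",
--     "specialty",
--     "dea",
--     "caqh",
--     "provider",
-- ]
-- _FACILITY_SIGNALS = [
--     "facility",
--     "organization",
--     "facility type",
--     "line of business",
--     "group npi",
--     "facility npi",
-- ]
-- _ALL_SIGNALS = _PRACTITIONER_SIGNALS + _FACILITY_SIGNALS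
--
--
-- def _detect_roster_type_from_columns(columns):
--     # one pass over the columns, maintaining the set of signals already seen
--     matched = set()
--     for col in columns:
--         c = col.lower()
--         matched.update(s for s in _ALL_SIGNALS if s in c)
--     p_score = sum(1 for s in _PRACTITIONER_SIGNALS if s in matched)
--     f_score = sum(1 for s in _FACILITY_SIGNALS if s in matched)
--     return "practitioner" if p_score >= f_score else "facility"
-- ===== Notes on version B (the rewrite author's own statement) =====
-- stated objective: alternative
-- what changed: B makes a single pass over the columns, maintaining a set of signals matched so far, instead of A's per-signal rescans of the whole lowered column list; the scores are then read off the set.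
import Mathlib
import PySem

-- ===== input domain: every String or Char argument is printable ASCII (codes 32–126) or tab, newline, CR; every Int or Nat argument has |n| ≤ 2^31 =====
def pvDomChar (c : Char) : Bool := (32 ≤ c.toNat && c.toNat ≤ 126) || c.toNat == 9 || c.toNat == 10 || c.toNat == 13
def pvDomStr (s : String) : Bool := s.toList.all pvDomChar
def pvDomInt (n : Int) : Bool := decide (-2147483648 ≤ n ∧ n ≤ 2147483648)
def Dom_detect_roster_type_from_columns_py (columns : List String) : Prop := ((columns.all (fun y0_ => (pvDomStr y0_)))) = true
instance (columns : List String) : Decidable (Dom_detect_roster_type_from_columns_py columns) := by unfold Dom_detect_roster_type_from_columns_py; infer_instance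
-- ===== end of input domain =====

-- B replaces A's per-signal rescans of all columns by a single pass over the columns
-- maintaining the set of signals matched so far (alternative decomposition, same cost class).


-- ===== PORT A =====
def detect_roster_type_from_columns_py (columns : List String) : String :=
  let lowered := columns.map (fun c => PySem.Str.lower c)
  let practitioner_signals : List String :=
    ["first name", "last name", "dob", "date of birth", "taxonomy",
     "specialty", "dea", "caqh", "provider"]
  let facility_signals : List String :=
    ["facility", "organization", "facility type", "line of business",
     "group npi", "facility npi"]
  let p_score := practitioner_signals.countP
    (fun signal => lowered.any (fun col => PySem.Str.isIn signal col))
  let f_score := facility_signals.countP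
    (fun signal => lowered.any (fun col => PySem.Str.isIn signal col))
  if p_score ≥ f_score then "practitioner" else "facility"

-- ===== PORT B =====
def pvPractitionerSignals : List String :=
  ["first name", "last name", "dob", "date of birth", "taxonomy",
   "specialty", "dea", "caqh", "provider"]
def pvFacilitySignals : List String :=
  ["facility", "organization", "facility type", "line of business",
   "group npi", "facility npi"]
def pvAllSignals : List String := pvPractitionerSignals ++ pvFacilitySignals

def detect_roster_type_from_columns_py_alt (columns : List String) : String :=
  let matched : PySem.Set String := columns.foldl
    (fun m col =>
      let c := PySem.Str.lower col
      PySem.Set.update m (pvAllSignals.filter (fun s => PySem.Str.isIn s c)))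
    PySem.Set.empty
  let p_score := pvPractitionerSignals.countP (fun s => PySem.Set.contains matched s)
  let f_score := pvFacilitySignals.countP (fun s => PySem.Set.contains matched s)
  if p_score ≥ f_score then "practitioner" else "facility"

-- ===== PRECONDITION & SPEC =====
def Spec_detect_roster_type_from_columns_py (columns : List String) (out : String) : Prop := out = detect_roster_type_from_columns_py_alt columns
instance (columns : List String) (out : String) : Decidable (Spec_detect_roster_type_from_columns_py columns out) := by unfold Spec_detect_roster_type_from_columns_py; infer_instance

-- ===== CLAIM (what is proved, stated in full; the proofs are below) =====
def Claim_equal_detect_roster_type_from_columns_py : Prop := ∀ (columns : List String), Dom_detect_roster_type_from_columns_py columns → Spec_detect_roster_type_from_columns_py columns (detect_roster_type_from_columns_py columns)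

-- ===== LEMMAS AND PROOFS =====

/-- Membership in the matched-set fold of B: a signal is in the final set iff it was in the
initial set or it is one of the signals and some column (lowercased) contains it. -/
theorem mem_matched_fold (columns : List String) (m : PySem.Set String) (y : String) :
    y ∈ columns.foldl
      (fun m col =>
        PySem.Set.update m (pvAllSignals.filter (fun s => PySem.Str.isIn s (PySem.Str.lower col))))
      m
    ↔ y ∈ m ∨ (y ∈ pvAllSignals ∧ ∃ col ∈ columns, PySem.Str.isIn y (PySem.Str.lower col) = true) := by
  induction columns generalizing m with
  | nil => simp
  | cons c cs ih =>
    simp only [List.foldl_cons, ih, PySem.Set.mem_update, List.mem_filter, List.mem_cons]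
    constructor
    · rintro (⟨h | ⟨hy, hc⟩⟩ | ⟨hy, col, hcol, hin⟩)
      · exact Or.inl h
      · exact Or.inr ⟨hy, c, Or.inl rfl, hc⟩
      · exact Or.inr ⟨hy, col, Or.inr hcol, hin⟩
    · rintro (h | ⟨hy, col, (rfl | hcol), hin⟩)
      · exact Or.inl (Or.inl h)
      · exact Or.inl (Or.inr ⟨hy, hin⟩)
      · exact Or.inr ⟨hy, col, hcol, hin⟩

/-- For a signal among the signal lists, B's set-membership test agrees with A's any-column scan. -/
theorem contains_matched_eq (columns : List String) (s : String) (hs : s ∈ pvAllSignals) :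
    PySem.Set.contains
      (columns.foldl
        (fun m col =>
          PySem.Set.update m (pvAllSignals.filter (fun t => PySem.Str.isIn t (PySem.Str.lower col))))
        PySem.Set.empty) s
    = (columns.map (fun c => PySem.Str.lower c)).any (fun col => PySem.Str.isIn s col) := by
  rcases h : (columns.map (fun c => PySem.Str.lower c)).any (fun col => PySem.Str.isIn s col) with _ | _
  · rw [Bool.eq_false_iff]
    intro hc
    have := (PySem.Set.contains_iff _ _).mp hc
    rw [mem_matched_fold] at this
    rcases this with h' | ⟨_, col, hcol, hin⟩
    · simp [PySem.Set.empty] at h'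
    · rw [Bool.eq_false_iff] at h
      exact h (by simp only [List.any_map, List.any_eq_true]; exact ⟨col, hcol, hin⟩)
  · apply (PySem.Set.contains_iff _ _).mpr
    rw [mem_matched_fold]
    simp only [List.any_map, List.any_eq_true] at h
    obtain ⟨col, hcol, hin⟩ := h
    exact Or.inr ⟨hs, col, hcol, hin⟩

-- ===== VERDICT (by name: the statement is the Claim_ definition above) =====
theorem detect_roster_type_from_columns_py_spec : Claim_equal_detect_roster_type_from_columns_py := by
  intro columns _
  show _ = _
  unfold detect_roster_type_from_columns_py detect_roster_type_from_columns_py_alt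
  simp only []
  have hP : (["first name", "last name", "dob", "date of birth", "taxonomy",
      "specialty", "dea", "caqh", "provider"] : List String).countP
        (fun signal => (columns.map (fun c => PySem.Str.lower c)).any
          (fun col => PySem.Str.isIn signal col))
      = pvPractitionerSignals.countP (fun s => PySem.Set.contains
          (columns.foldl (fun m col => PySem.Set.update m
            (pvAllSignals.filter (fun t => PySem.Str.isIn t (PySem.Str.lower col))))
            PySem.Set.empty) s) := by
    apply Eq.symm
    apply List.countP_congr
    intro s hsP
    rw [contains_matched_eq columns s (List.mem_append_left _ hsP)]
  have hF : (["facility", "organization", "facility type", "line of business",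
      "group npi", "facility npi"] : List String).countP
        (fun signal => (columns.map (fun c => PySem.Str.lower c)).any
          (fun col => PySem.Str.isIn signal col))
      = pvFacilitySignals.countP (fun s => PySem.Set.contains
          (columns.foldl (fun m col => PySem.Set.update m
            (pvAllSignals.filter (fun t => PySem.Str.isIn t (PySem.Str.lower col))))
            PySem.Set.empty) s) := by
    apply Eq.symm
    apply List.countP_congr
    intro s hsF
    rw [contains_matched_eq columns s (List.mem_append_right _ hsF)]
  rw [hP, hF]
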